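-- pv_equiv track=rewrite | github.com/Senior3514/AngelClaw | cloud/guardian/network_warden.py | _is_suspicious_domain
-- ===== SOURCE A (Python) =====
-- def _is_suspicious_domain(domain: str) -> bool:
--     """Check if a domain matches suspicious patterns."""
--     suspicious_tlds = {".onion", ".bit", ".bazar", ".coin"}
--     suspicious_patterns = {"c2.", "beacon.", "exfil.", "callback.", "payload."}
--     domain_lower = domain.lower()
--     for tld in suspicious_tlds:
--         if domain_lower.endswith(tld):
--             return True
--     for pat in suspicious_patterns:
--         if pat in domain_lower:
--             return True
--     # Very long subdomains often indicate DNS tunneling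
--     labels = domain_lower.split(".")
--     if any(len(label) > 50 for label in labels):
--         return True
--     return False
-- ===== SOURCE B (Python) =====
-- _TLDS = ("onion", "bit", "bazar", "coin")
-- _STEMS = ("c2", "beacon", "exfil", "callback", "payload")
--
--
-- def _is_suspicious_domain(domain: str) -> bool:
--     """Single left-to-right character scan: build each label incrementally and
--     judge it the moment it closes (at a dot) or at end of string."""
--     label = []
--     saw_dot = False
--     for ch in domain.lower():
--         if ch == ".":
--             lab = "".join(label)
--             if any(lab.endswith(s) for s in _STEMS):
--                 return True
--             if len(lab) > 50:
--                 return True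
--             label = []
--             saw_dot = True
--         else:
--             label.append(ch)
--     lab = "".join(label)
--     if len(lab) > 50:
--         return True
--     return saw_dot and lab in _TLDS
-- ===== Notes on version B (the rewrite author's own statement) =====
-- stated objective: alternative
-- what changed: B is a single left-to-right character scan (a small state machine carrying the current label and a saw-a-dot flag) that judges each label as it closes, replacing A's whole-string endswith loop, substring scans and final split-then-check passes.
import Mathlib
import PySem

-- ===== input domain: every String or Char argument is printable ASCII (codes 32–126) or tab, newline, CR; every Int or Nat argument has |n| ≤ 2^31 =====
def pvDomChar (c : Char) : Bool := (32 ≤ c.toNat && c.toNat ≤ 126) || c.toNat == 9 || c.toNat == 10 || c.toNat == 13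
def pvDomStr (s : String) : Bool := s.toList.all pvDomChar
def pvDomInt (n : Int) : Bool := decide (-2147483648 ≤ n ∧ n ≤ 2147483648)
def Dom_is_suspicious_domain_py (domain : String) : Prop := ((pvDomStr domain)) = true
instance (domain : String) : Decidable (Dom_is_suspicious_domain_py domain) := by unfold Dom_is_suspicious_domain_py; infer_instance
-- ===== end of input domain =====

-- B replaces A's whole-string suffix loop, substring scans and final split by a
-- single left-to-right character scan that builds each label incrementally and
-- judges it when it closes (alternative decomposition, similar cost).


-- ===== PORT A =====
-- suspicious_tlds / suspicious_patterns are Python set literals; the loops over them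
-- compute an order-independent `any`, so the literal listing order is kept.
def pvTldsA : List (List Char) := [".onion".toList, ".bit".toList, ".bazar".toList, ".coin".toList]
def pvPatsA : List (List Char) := ["c2.".toList, "beacon.".toList, "exfil.".toList, "callback.".toList, "payload.".toList]

def is_suspicious_domain_py (domain : String) : Bool :=
  let domain_lower := PySem.Chars.lower domain.toList
  -- for tld in suspicious_tlds: if domain_lower.endswith(tld): return True
  if pvTldsA.any (fun tld => PySem.Chars.endswith domain_lower tld) then true
  -- for pat in suspicious_patterns: if pat in domain_lower: return True
  else if pvPatsA.any (fun pat => PySem.Chars.isIn pat domain_lower) then true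
  -- labels = domain_lower.split("."); if any(len(label) > 50 for label in labels): return True
  else if (PySem.Chars.splitOn domain_lower ['.']).any (fun label => decide (50 < label.length)) then true
  else false

-- ===== PORT B =====
def pvTldsB : List (List Char) := ["onion".toList, "bit".toList, "bazar".toList, "coin".toList]
def pvStemsB : List (List Char) := ["c2".toList, "beacon".toList, "exfil".toList, "callback".toList, "payload".toList]

-- the `for ch in domain.lower():` loop with its early returns, as structural
-- recursion over the remaining characters with state (label, saw_dot)
def pvScanB (label : List Char) (saw_dot : Bool) : List Char → Bool
  | [] =>
    -- after the loop: if len(lab) > 50: return True; return saw_dot and lab in _TLDS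
    decide (50 < label.length) || (saw_dot && pvTldsB.any (fun t => label == t))
  | ch :: rest =>
    if ch = '.' then
      if pvStemsB.any (fun s => PySem.Chars.endswith label s) then true
      else if decide (50 < label.length) then true
      else pvScanB [] true rest
    else pvScanB (label ++ [ch]) saw_dot rest

def is_suspicious_domain_py_alt (domain : String) : Bool :=
  pvScanB [] false (PySem.Chars.lower domain.toList)

-- ===== PRECONDITION & SPEC =====
def Spec_is_suspicious_domain_py (domain : String) (out : Bool) : Prop := out = is_suspicious_domain_py_alt domain
instance (domain : String) (out : Bool) : Decidable (Spec_is_suspicious_domain_py domain out) := by unfold Spec_is_suspicious_domain_py; infer_instance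

-- ===== CLAIM (what is proved, stated in full; the proofs are below) =====
def Claim_equal_is_suspicious_domain_py : Prop := ∀ (domain : String), Dom_is_suspicious_domain_py domain → Spec_is_suspicious_domain_py domain (is_suspicious_domain_py domain)

-- ===== LEMMAS AND PROOFS =====

def pvLabs (pre : List Char) : List Char → List (List Char)
  | [] => [pre]
  | c :: rest => if c = '.' then pre :: pvLabs [] rest else pvLabs (pre ++ [c]) rest

theorem pvLabs_ne_nil (pre : List Char) (s : List Char) : pvLabs pre s ≠ [] := by
  induction s generalizing pre with
  | nil => simp [pvLabs]
  | cons c rest ih => by_cases h : c = '.' <;> simp [pvLabs, h, ih]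

theorem pvLabs_modifyHead (pre : List Char) (s : List Char) :
    pvLabs pre s = (pvLabs [] s).modifyHead (pre ++ ·) := by
  induction s generalizing pre with
  | nil => simp [pvLabs]
  | cons c rest ih =>
    by_cases h : c = '.'
    · simp [pvLabs, h]
    · simp only [pvLabs, if_neg h]
      rw [ih (pre ++ [c])]
      simp only [List.nil_append]
      rw [ih [c]]
      obtain ⟨x, t, hx⟩ := List.exists_cons_of_ne_nil (pvLabs_ne_nil [] rest)
      simp [hx]

theorem pvLabs_no_dot (pre : List Char) (s : List Char) (h : '.' ∉ s) :
    pvLabs pre s = [pre ++ s] := by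
  induction s generalizing pre with
  | nil => simp [pvLabs]
  | cons c rest ih =>
    simp only [List.mem_cons, not_or] at h
    rw [pvLabs, if_neg (fun hh => h.1 hh.symm), ih _ h.2]
    simp

theorem pvLabs_dot_len (pre : List Char) (s : List Char) (h : '.' ∈ s) :
    2 ≤ (pvLabs pre s).length := by
  induction s generalizing pre with
  | nil => simp at h
  | cons c rest ih =>
    by_cases hc : c = '.'
    · have := pvLabs_ne_nil ([] : List Char) rest
      simp [pvLabs, hc]
      cases hpl : pvLabs [] rest with
      | nil => exact absurd hpl this
      | cons a t => simp
    · simp only [List.mem_cons] at h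
      rcases h with h | h
      · exact absurd h.symm hc
      · rw [pvLabs, if_neg hc]; exact ih _ h

theorem pvLabs_single (s x : List Char) (h : pvLabs [] s = [x]) : s = x ∧ '.' ∉ s := by
  by_cases hd : '.' ∈ s
  · have := pvLabs_dot_len [] s hd; rw [h] at this; simp at this
  · have := pvLabs_no_dot [] s hd; rw [h] at this; simp at this
    exact ⟨this.symm ▸ rfl, by simpa [this] using hd⟩

theorem pvLabs_decomp (s : List Char) (pre l0 l1 : List Char) (t : List (List Char))
    (h : pvLabs pre s = l0 :: l1 :: t) :
    ∃ m s₂, s = m ++ '.' :: s₂ ∧ l0 = pre ++ m ∧ '.' ∉ m ∧ pvLabs [] s₂ = l1 :: t := by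
  induction s generalizing pre l0 with
  | nil => simp [pvLabs] at h
  | cons c rest ih =>
    by_cases hc : c = '.'
    · subst hc
      rw [pvLabs, if_pos rfl] at h
      obtain ⟨h1, h2⟩ := List.cons.injEq .. ▸ h
      refine ⟨[], rest, by simp, by simp [h1.symm], by simp, ?_⟩
      · simpa using h2
    · rw [pvLabs, if_neg hc] at h
      obtain ⟨m, s₂, h1, h2, h3, h4⟩ := ih _ _ h
      exact ⟨c :: m, s₂, by simp [h1], by simp [h2], by
        simp only [List.mem_cons, not_or]; exact ⟨fun hh => hc hh.symm, h3⟩, h4⟩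

theorem pv_prefix_dot (p l r : List Char) (hp : '.' ∉ p) (hl : '.' ∉ l) :
    (p ++ ['.']) <+: (l ++ '.' :: r) ↔ p = l := by
  induction p generalizing l with
  | nil =>
    cases l with
    | nil => simp
    | cons b l' =>
      simp only [List.mem_cons, not_or] at hl
      simp only [List.cons_append, List.nil_append, List.cons_prefix_cons]
      constructor
      · rintro ⟨h1, -⟩; exact absurd h1 hl.1
      · intro h; simp at h
  | cons a p' ih =>
    simp only [List.mem_cons, not_or] at hp
    cases l with
    | nil =>
      simp only [List.cons_append, List.nil_append, List.cons_prefix_cons]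
      constructor
      · rintro ⟨h1, -⟩; exact absurd h1.symm hp.1
      · intro h; simp at h
    | cons b l' =>
      simp only [List.mem_cons, not_or] at hl
      simp only [List.cons_append, List.cons_prefix_cons]
      rw [ih l' hp.2 hl.2]
      constructor
      · rintro ⟨h1, h2⟩; simp [h1, h2]
      · intro h; injection h with h1 h2; exact ⟨h1, h2⟩

theorem pv_suffix_iff (p : List Char) (hp : '.' ∉ p) (s : List Char) :
    ('.' :: p) <:+ s ↔ 2 ≤ (pvLabs [] s).length ∧ (pvLabs [] s).getLast? = some p := by
  induction s with
  | nil => simp [pvLabs]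
  | cons c rest ih =>
    by_cases hc : c = '.'
    · subst hc
      rw [pvLabs, if_pos rfl]
      obtain ⟨x, t, hx⟩ := List.exists_cons_of_ne_nil (pvLabs_ne_nil [] rest)
      rw [List.suffix_cons_iff, hx]
      constructor
      · rintro (heq | hsuf)
        · injection heq with _ h2
          have hnd : '.' ∉ rest := h2 ▸ hp
          rw [pvLabs_no_dot [] rest hnd] at hx
          simp only [List.nil_append] at hx
          injection hx with h3 h4
          subst h3
          cases h4
          refine ⟨by simp, ?_⟩
          simp [h2]
        · rw [hx] at ih
          obtain ⟨h1, h2⟩ := ih.mp hsuf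
          exact ⟨by simp, by rw [List.getLast?_cons_cons]; exact h2⟩
      · rintro ⟨-, h2⟩
        cases t with
        | nil =>
          simp at h2
          obtain ⟨hrx, hnd⟩ := pvLabs_single rest x hx
          left; rw [hrx, h2]
        | cons y t' =>
          right
          rw [hx] at ih
          refine ih.mpr ⟨by simp, ?_⟩
          simpa using h2
    · rw [pvLabs, if_neg hc]
      simp only [List.nil_append]
      rw [pvLabs_modifyHead [c] rest]
      obtain ⟨x, t, hx⟩ := List.exists_cons_of_ne_nil (pvLabs_ne_nil [] rest)
      rw [hx] at ih ⊢
      simp only [List.modifyHead_cons]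
      rw [List.suffix_cons_iff]
      have hne : ¬ ('.' :: p = c :: rest) := by
        intro h; injection h with h1 _; exact hc h1.symm
      cases t with
      | nil =>
        simp only [hne, false_or]
        rw [ih]
        simp
      | cons y t' =>
        simp only [hne, false_or]
        rw [ih]
        simp only [List.length_cons, List.getLast?_cons_cons]

theorem pv_infix_iff (p : List Char) (hp : '.' ∉ p) (hne : p ≠ []) (s : List Char) :
    (p ++ ['.']) <:+: s ↔ ∃ lab ∈ (pvLabs [] s).dropLast, p <:+ lab := by
  induction s with
  | nil =>
    constructor
    · intro h; have := h.sublist.length_le; simp at this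
    · rintro ⟨lab, hmem, -⟩; simp [pvLabs] at hmem
  | cons c rest ih =>
    rw [List.infix_cons_iff]
    by_cases hc : c = '.'
    · subst hc
      rw [pvLabs, if_pos rfl]
      obtain ⟨x, t, hx⟩ := List.exists_cons_of_ne_nil (pvLabs_ne_nil [] rest)
      have hpre : ¬ ((p ++ ['.']) <+: ('.' :: rest)) := by
        obtain ⟨a, p', rfl⟩ := List.exists_cons_of_ne_nil hne
        rw [List.cons_append, List.cons_prefix_cons]
        rintro ⟨h1, -⟩
        exact hp (by simp [h1])
      rw [hx]
      simp only [hpre, false_or]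
      rw [ih, hx]
      simp only [List.dropLast_cons_of_ne_nil (List.cons_ne_nil x t), List.mem_cons]
      constructor
      · rintro ⟨lab, h1, h2⟩; exact ⟨lab, Or.inr h1, h2⟩
      · rintro ⟨lab, h1, h2⟩
        rcases h1 with rfl | h1
        · exact absurd (List.suffix_nil.mp h2) hne
        · exact ⟨lab, h1, h2⟩
    · rw [pvLabs, if_neg hc]
      simp only [List.nil_append]
      rw [pvLabs_modifyHead [c] rest]
      obtain ⟨x, t, hx⟩ := List.exists_cons_of_ne_nil (pvLabs_ne_nil [] rest)
      rw [hx] at ih ⊢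
      simp only [List.modifyHead_cons]
      cases t with
      | nil =>
        obtain ⟨hrx, hnd⟩ := pvLabs_single rest x hx
        constructor
        · intro h
          rcases h with h | h
          · have : '.' ∈ c :: rest := h.mem (by simp)
            simp only [List.mem_cons] at this
            rcases this with h' | h'
            · exact (hc h'.symm).elim
            · exact absurd h' hnd
          · have : '.' ∈ rest := h.sublist.mem (by simp)
            exact absurd this hnd
        · rintro ⟨lab, hmem, -⟩; simp at hmem
      | cons y t' =>
        obtain ⟨m, s₂, hs, hm0, hmnd, hs2⟩ := pvLabs_decomp rest [] x y t' hx
        simp only [List.nil_append] at hm0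
        subst hm0
        have hprefix : (p ++ ['.']) <+: (c :: rest) ↔ p = c :: x := by
          rw [hs, show (c :: (x ++ '.' :: s₂)) = (c :: x) ++ '.' :: s₂ by simp]
          exact pv_prefix_dot p (c :: x) s₂ hp (by
            simp only [List.mem_cons, not_or]
            exact ⟨fun h => hc h.symm, hmnd⟩)
        rw [hprefix, ih]
        simp only [List.dropLast_cons_of_ne_nil (by simp : (y :: t') ≠ ([] : List (List Char))), List.mem_cons]
        constructor
        · rintro (rfl | ⟨lab, h1, h2⟩)
          · exact ⟨c :: x, Or.inl rfl, List.suffix_refl _⟩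
          · rcases h1 with rfl | h1
            · exact ⟨c :: lab, Or.inl rfl, h2.trans (List.suffix_cons _ _)⟩
            · exact ⟨lab, Or.inr h1, h2⟩
        · rintro ⟨lab, h1, h2⟩
          rcases h1 with rfl | h1
          · rcases List.suffix_cons_iff.mp h2 with rfl | h2
            · exact Or.inl rfl
            · exact Or.inr ⟨x, Or.inl rfl, h2⟩
          · exact Or.inr ⟨lab, Or.inr h1, h2⟩

theorem pv_go_eq (s : List Char) (fuel : Nat) (cur : List Char) (acc : List (List Char))
    (h : s.length ≤ fuel) :
    PySem.Chars.splitOn.go ['.'] fuel s cur acc = acc.reverse ++ pvLabs cur.reverse s := by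
  induction s generalizing fuel cur acc with
  | nil =>
    cases fuel with
    | zero => simp [PySem.Chars.splitOn.go, pvLabs]
    | succ f => simp [PySem.Chars.splitOn.go, pvLabs]
  | cons c rest ih =>
    cases fuel with
    | zero => simp at h
    | succ f =>
      rw [PySem.Chars.splitOn.go]
      simp only [List.length_cons] at h
      by_cases hc : c = '.'
      · subst hc
        have hpre : List.isPrefixOf ['.'] ('.' :: rest) = true := by simp [List.isPrefixOf]
        rw [if_pos hpre]
        simp only [List.length_singleton, List.drop_succ_cons, List.drop_zero]
        rw [ih f [] (cur.reverse :: acc) (by omega)]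
        simp [pvLabs]
      · have hpre : List.isPrefixOf ['.'] (c :: rest) = false := by
          simp [List.isPrefixOf]; exact fun hh => (hc hh.symm).elim
        rw [if_neg (by simp [hpre])]
        rw [ih f (c :: cur) acc (by omega)]
        simp [pvLabs, hc]

theorem pv_splitOn_eq_labs (s : List Char) : PySem.Chars.splitOn s ['.'] = pvLabs [] s := by
  simpa using pv_go_eq s (s.length + 1) [] [] (by omega)

-- what the scan computes, in terms of the label decomposition pvLabs
theorem pvScanB_spec (s : List Char) (lab : List Char) (sd : Bool) :
    pvScanB lab sd s =
      ((pvLabs lab s).dropLast.any (fun l => pvStemsB.any (fun st => PySem.Chars.endswith l st))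
       || (pvLabs lab s).any (fun l => decide (50 < l.length))
       || ((sd || decide (2 ≤ (pvLabs lab s).length))
           && pvTldsB.any (fun t => ((pvLabs lab s).getLast?.getD []) == t))) := by
  induction s generalizing lab sd with
  | nil =>
    simp [pvScanB, pvLabs]
  | cons c rest ih =>
    by_cases hc : c = '.'
    · subst hc
      rw [pvScanB, if_pos rfl, pvLabs, if_pos rfl]
      obtain ⟨x, t, hx⟩ := List.exists_cons_of_ne_nil (pvLabs_ne_nil [] rest)
      rw [ih [] true, hx]
      simp only [List.dropLast_cons_of_ne_nil (List.cons_ne_nil x t), List.any_cons,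
        List.getLast?_cons_cons, List.length_cons, Bool.true_or]
      have h2 : (2:Nat) ≤ t.length + 1 + 1 := by omega
      apply Bool.coe_iff_coe.mp
      by_cases ha : pvStemsB.any (fun st => PySem.Chars.endswith lab st) = true <;>
        by_cases hb : decide (50 < lab.length) = true <;>
          simp [ha, hb, h2]
    · rw [pvScanB, if_neg hc, pvLabs, if_neg hc]
      exact ih (lab ++ [c]) sd

set_option maxHeartbeats 4000000 in
theorem pv_main (dl : List Char) :
    (if pvTldsA.any (fun tld => PySem.Chars.endswith dl tld) then true
     else if pvPatsA.any (fun pat => PySem.Chars.isIn pat dl) then true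
     else if (PySem.Chars.splitOn dl ['.']).any (fun label => decide (50 < label.length)) then true
     else false)
    = pvScanB [] false dl := by
  rw [pvScanB_spec, pv_splitOn_eq_labs]
  apply Bool.coe_iff_coe.mp
  simp only [pvTldsA, pvPatsA, pvTldsB, pvStemsB, List.any_cons, List.any_nil,
    Bool.if_true_left, Bool.if_false_right, Bool.or_eq_true, Bool.and_eq_true,
    Bool.false_or, List.any_eq_true, decide_eq_true_eq, PySem.Chars.endswith_iff,
    beq_iff_eq]
  rw [show ".onion".toList = '.' :: "onion".toList from rfl,
     show ".bit".toList = '.' :: "bit".toList from rfl,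
     show ".bazar".toList = '.' :: "bazar".toList from rfl,
     show ".coin".toList = '.' :: "coin".toList from rfl,
     pv_suffix_iff "onion".toList (by decide) dl,
     pv_suffix_iff "bit".toList (by decide) dl,
     pv_suffix_iff "bazar".toList (by decide) dl,
     pv_suffix_iff "coin".toList (by decide) dl,
     PySem.Chars.isIn_iff_infix, PySem.Chars.isIn_iff_infix, PySem.Chars.isIn_iff_infix,
     PySem.Chars.isIn_iff_infix, PySem.Chars.isIn_iff_infix,
     show "c2.".toList = "c2".toList ++ ['.'] from rfl,
     show "beacon.".toList = "beacon".toList ++ ['.'] from rfl,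
     show "exfil.".toList = "exfil".toList ++ ['.'] from rfl,
     show "callback.".toList = "callback".toList ++ ['.'] from rfl,
     show "payload.".toList = "payload".toList ++ ['.'] from rfl,
     pv_infix_iff "c2".toList (by decide) (by decide) dl,
     pv_infix_iff "beacon".toList (by decide) (by decide) dl,
     pv_infix_iff "exfil".toList (by decide) (by decide) dl,
     pv_infix_iff "callback".toList (by decide) (by decide) dl,
     pv_infix_iff "payload".toList (by decide) (by decide) dl]
  obtain ⟨x, t, hx⟩ := List.exists_cons_of_ne_nil (pvLabs_ne_nil [] dl)
  rw [hx]
  obtain ⟨g, hg⟩ := Option.isSome_iff_exists.mp (List.getLast?_isSome.mpr (List.cons_ne_nil x t))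
  rw [hg]
  simp only [Option.getD_some, Option.some.injEq, Bool.false_eq_true, or_false,
    and_true, and_or_left, exists_or]
  exact or_comm

-- ===== VERDICT (by name: the statement is the Claim_ definition above) =====
theorem is_suspicious_domain_py_spec : Claim_equal_is_suspicious_domain_py := by
  intro domain _
  unfold Spec_is_suspicious_domain_py is_suspicious_domain_py is_suspicious_domain_py_alt
  exact pv_main (PySem.Chars.lower domain.toList)
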